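-- pv_equiv track=rewrite | github.com/PrudyvusP/algorithms_collection | stepik_contest_!/1_seq_num.py | solution
-- ===== SOURCE A (Python) =====
-- def solution(num: int):
--     x = 1
--     res = []
--     while len(res) <= num:
--         for _ in range(1, x + 1):
--             res.append(str(x))
--         x += 1
--     return ' '.join(res[:num])
-- ===== SOURCE B (Python) =====
-- from math import isqrt
--
--
-- def solution(num: int):
--     return ' '.join(str((isqrt(8 * i + 1) + 1) // 2) for i in range(num))
-- ===== Notes on version B (the rewrite author's own statement) =====
-- stated objective: idiomatic
-- what changed: Instead of growing the whole triangular sequence block by block until it overshoots num and then slicing, B computes each position's value directly with the inverse-triangular closed form (isqrt(8*i+1)+1)//2 for i in range(num) and joins.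
import Mathlib
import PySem

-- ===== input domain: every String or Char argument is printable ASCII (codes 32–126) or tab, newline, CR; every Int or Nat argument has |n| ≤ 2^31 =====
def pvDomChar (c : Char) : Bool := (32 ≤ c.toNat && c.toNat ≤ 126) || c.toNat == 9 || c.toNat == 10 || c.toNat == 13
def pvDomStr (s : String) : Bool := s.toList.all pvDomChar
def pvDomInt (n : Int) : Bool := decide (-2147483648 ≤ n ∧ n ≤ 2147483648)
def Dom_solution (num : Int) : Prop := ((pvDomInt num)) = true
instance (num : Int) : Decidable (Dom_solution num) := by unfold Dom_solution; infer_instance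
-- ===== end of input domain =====

-- B replaces A's grow-until-overshoot-then-slice loop by computing each position's value
-- directly with the inverse-triangular closed form (isqrt); objective: idiomatic, same O(num) cost.

-- ===== PORT A =====
-- while len(res) <= num: for _ in range(1, x+1): res.append(str(x)); x += 1
-- (fuel num.toNat+1 is an upper bound on the iterations the while loop performs: each
--  iteration appends at least one element, so it exits within num.toNat+1 iterations)
def solutionLoopA : Nat → Int → Int → List String → List String
  | 0, _, _, res => res
  | fuel+1, num, x, res =>
    if (res.length : Int) ≤ num then
      solutionLoopA fuel num (x + 1)
        ((PySem.List.pyRange 1 (x + 1) 1).foldl (fun acc _ => acc ++ [PySem.Int.toStr x]) res)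
    else res

def solution (num : Int) : String :=
  PySem.Str.join " " (PySem.List.slice (solutionLoopA (num.toNat + 1) num 1 []) none (some num))

-- ===== PORT B =====
-- ' '.join(str((isqrt(8*i+1)+1)//2) for i in range(num))
def solution_alt (num : Int) : String :=
  PySem.Str.join " "
    ((PySem.List.pyRange 0 num 1).map (fun i =>
      PySem.Int.toStr (PySem.Int.floordiv ((Nat.sqrt (8 * i + 1).toNat : Int) + 1) 2)))

-- ===== PRECONDITION & SPEC =====
def Spec_solution (num : Int) (out : String) : Prop := out = solution_alt num
instance (num : Int) (out : String) : Decidable (Spec_solution num out) := by unfold Spec_solution; infer_instance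

-- ===== CLAIM (what is proved, stated in full; the proofs are below) =====
def Claim_equal_solution : Prop := ∀ (num : Int), Dom_solution num → Spec_solution num (solution num)

-- ===== LEMMAS AND PROOFS =====

-- the sequence A has built after processing x = 1 .. k
def triSeq : Nat → List String
  | 0 => []
  | k+1 => triSeq k ++ List.replicate (k+1) (PySem.Int.toStr ((k : Int) + 1))

-- B's per-position value, on the Nat side
def gClosed (i : Nat) : String := PySem.Int.toStr (((Nat.sqrt (8 * i + 1) + 1) / 2 : Nat) : Int)

lemma triSeq_length (k : Nat) : (triSeq k).length = k * (k + 1) / 2 := by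
  induction k with
  | zero => simp [triSeq]
  | succ k ih =>
      have he : 2 ∣ k * (k + 1) := (Nat.even_mul_succ_self k).two_dvd
      have h3 : (k + 1) * (k + 1 + 1) = k * (k + 1) + 2 * (k + 1) := by ring
      simp [triSeq, ih]
      omega

lemma sqrt_band (k i : Nat) (h1 : k * (k + 1) / 2 ≤ i) (h2 : i < (k + 1) * (k + 2) / 2) :
    (Nat.sqrt (8 * i + 1) + 1) / 2 = k + 1 := by
  have he : 2 ∣ k * (k + 1) := (Nat.even_mul_succ_self k).two_dvd
  have he' : 2 ∣ (k + 1) * (k + 2) := (Nat.even_mul_succ_self (k+1)).two_dvd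
  have hlo : 2 * k + 1 ≤ Nat.sqrt (8 * i + 1) := by
    rw [Nat.le_sqrt]
    nlinarith [Nat.div_mul_cancel he, Nat.le_of_lt h2]
  have hhi : Nat.sqrt (8 * i + 1) < 2 * k + 3 := by
    rw [Nat.sqrt_lt]
    nlinarith [Nat.div_mul_cancel he']
  omega

lemma triSeq_eq_map (k : Nat) : triSeq k = (List.range (triSeq k).length).map gClosed := by
  induction k with
  | zero => simp [triSeq]
  | succ k ih =>
      have hlen : (triSeq (k+1)).length = (triSeq k).length + (k + 1) := by
        simp [triSeq]
      rw [hlen, List.range_add, List.map_append, ← ih, List.map_map]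
      have hrep : (List.range (k+1)).map (gClosed ∘ fun j => (triSeq k).length + j)
          = List.replicate (k+1) (PySem.Int.toStr ((k : Int) + 1)) := by
        rw [List.eq_replicate_iff]
        constructor
        · simp
        · intro b hb
          rcases List.mem_map.1 hb with ⟨j, hj, rfl⟩
          have hj' : j < k + 1 := List.mem_range.1 hj
          have hL := triSeq_length k
          have he : 2 ∣ k * (k + 1) := (Nat.even_mul_succ_self k).two_dvd
          have hr : (k + 1) * (k + 2) = k * (k + 1) + 2 * (k + 1) := by ring
          have h1 : k * (k + 1) / 2 ≤ (triSeq k).length + j := by omega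
          have h2 : (triSeq k).length + j < (k + 1) * (k + 2) / 2 := by omega
          simp only [Function.comp_apply, gClosed, sqrt_band k _ h1 h2]
          norm_num
      rw [hrep]
      simp [triSeq]

-- one while-iteration turns triSeq k into triSeq (k+1)
lemma loop_step (k : Nat) :
    (PySem.List.pyRange 1 ((k : Int) + 1 + 1) 1).foldl
      (fun acc _ => acc ++ [PySem.Int.toStr ((k : Int) + 1)]) (triSeq k) = triSeq (k + 1) := by
  rw [PySem.List.foldl_append_singleton_eq_map]
  have hlen : (PySem.List.pyRange 1 ((k : Int) + 1 + 1) 1).length = k + 1 := by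
    rw [PySem.List.length_pyRange_one]; omega
  rw [List.map_const', hlen]
  simp [triSeq]

lemma loopA_spec : ∀ (fuel : Nat) (k : Nat) (num : Int),
    num < ((triSeq k).length + fuel : Nat) →
    ∃ m : Nat, solutionLoopA fuel num ((k : Int) + 1) (triSeq k) = triSeq m ∧
      num < ((triSeq m).length : Int) := by
  intro fuel
  induction fuel with
  | zero =>
      intro k num h
      exact ⟨k, rfl, by exact_mod_cast h⟩
  | succ fuel ih =>
      intro k num h
      by_cases hc : ((triSeq k).length : Int) ≤ num
      · have hrec := ih (k+1) num (by
          have : (triSeq (k+1)).length = (triSeq k).length + (k+1) := by simp [triSeq]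
          omega)
        rcases hrec with ⟨m, hm, hlt⟩
        refine ⟨m, ?_, hlt⟩
        rw [solutionLoopA, if_pos hc, loop_step k]
        have : ((k : Int) + 1 + 1) = (((k+1 : Nat) : Int) + 1) := by push_cast; ring
        rw [this]
        exact hm
      · exact ⟨k, by rw [solutionLoopA, if_neg hc], by omega⟩

lemma natCast_div_two (s : Nat) : ((s : Nat) : Int) / 2 = ((s / 2 : Nat) : Int) := by
  omega

lemma alt_eq_map (num : Int) :
    solution_alt num = PySem.Str.join " " ((List.range num.toNat).map gClosed) := by
  unfold solution_alt
  rw [PySem.List.pyRange_one, List.map_map]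
  simp only [sub_zero]
  congr 1
  apply List.map_congr_left
  intro j _
  simp only [Function.comp_apply, zero_add]
  have h1 : (8 * ((j : Nat) : Int) + 1).toNat = 8 * j + 1 := by omega
  rw [h1, PySem.Int.floordiv_eq_ediv_of_pos (by norm_num)]
  have h2 : ((Nat.sqrt (8 * j + 1) : Int) + 1) = (((Nat.sqrt (8 * j + 1) + 1 : Nat)) : Int) := by
    push_cast; ring
  rw [h2, natCast_div_two]
  rfl

-- ===== VERDICT (by name: the statement is the Claim_ definition above) =====
theorem solution_spec : Claim_equal_solution := by
  unfold Claim_equal_solution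
  intro num _
  unfold Spec_solution solution
  by_cases hneg : num < 0
  · have h0 : solutionLoopA (num.toNat + 1) num 1 [] = [] := by
      have : num.toNat = 0 := by omega
      rw [this]
      rw [solutionLoopA, if_neg (by simpa using hneg)]
    rw [h0]
    have : PySem.List.slice ([] : List String) none (some num) = [] := by
      simp [PySem.List.slice]
    rw [this]
    unfold solution_alt
    rw [PySem.List.pyRange_one_eq_nil (by omega)]
    rfl
  · rw [not_lt] at hneg
    have hstart : (1 : Int) = ((0 : Nat) : Int) + 1 := by norm_num
    have h00 : (triSeq 0).length = 0 := rfl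
    have hfuel : num < (((triSeq 0).length + (num.toNat + 1) : Nat) : Int) := by
      rw [h00]; omega
    have := loopA_spec (num.toNat + 1) 0 num (by exact_mod_cast hfuel)
    rcases this with ⟨m, hm, hlt⟩
    have htri0 : (triSeq 0) = ([] : List String) := rfl
    rw [hstart, ← htri0, hm]
    rw [PySem.List.slice_to _ hneg]
    rw [triSeq_eq_map m, ← List.map_take, List.take_range]
    have hmin : min num.toNat (triSeq m).length = num.toNat := by
      have : num.toNat < (triSeq m).length := by omega
      omega
    rw [hmin, alt_eq_map num]
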